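-- pv_equiv track=rewrite | github.com/MrHamdulay/csc3-capstone | examples/data/Assignment_4/hbbirf001/boxes.py | get_rectangle
-- ===== SOURCE A (Python) =====
-- def get_rectangle(w,h):
--     rec = ''
--     for i in range(h):
--         if i == 0 or i==h-1:
--             rec += (w*'*')+'\n'
--         else:
--             rec +='*'+((w-2)*' ')+'*' + '\n'
--     return rec
-- ===== SOURCE B (Python) =====
-- def get_rectangle(w, h):
--     cols = max(w, 0)
--     out = []
--     for r in range(h):
--         for c in range(cols):
--             out.append('*' if r == 0 or r == h - 1 or c == 0 or c == cols - 1 else ' ')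
--         out.append('\n')
--     return ''.join(out)
-- ===== Notes on version B (the rewrite author's own statement) =====
-- stated objective: alternative
-- what changed: B generates the box pointwise from a coordinate predicate (cell (r,c) is '*' iff r or c is on the border of an h-by-max(w,0) grid) instead of concatenating per-row template strings chosen by a row test.
-- intended difference: For w <= 1 with h >= 3, A's middle rows are the two-character string '**' (from '*'+(w-2)*' '+'*' with a clamped negative repeat) although the box is at most 1 wide; B returns the intended width-max(w,0) rows ('*' for w=1, empty for w<=0). — e.g. on get_rectangle(1, 3): A returns "*\n**\n*\n", B returns "*\n*\n*\n"
import Mathlib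
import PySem

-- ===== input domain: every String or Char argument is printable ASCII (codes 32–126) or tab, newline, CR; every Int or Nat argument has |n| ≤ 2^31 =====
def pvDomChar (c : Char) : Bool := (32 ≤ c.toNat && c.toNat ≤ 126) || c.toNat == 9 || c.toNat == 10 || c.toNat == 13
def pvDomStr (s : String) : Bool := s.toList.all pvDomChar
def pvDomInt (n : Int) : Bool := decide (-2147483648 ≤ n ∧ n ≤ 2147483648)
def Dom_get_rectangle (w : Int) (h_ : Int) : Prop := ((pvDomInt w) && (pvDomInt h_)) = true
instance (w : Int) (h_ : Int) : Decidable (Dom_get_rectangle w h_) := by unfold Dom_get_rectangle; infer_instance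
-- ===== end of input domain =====

-- B builds the box pointwise from a coordinate border predicate instead of concatenating per-row template strings; on w ≤ 1, h_ ≥ 3 B returns the intended narrow rows where A's middle rows are '**'.


-- ===== PORT A =====
-- rec = ''; for i in range(h): if i==0 or i==h-1: rec += w*'*'+'\n' else: rec += '*'+(w-2)*' '+'*'+'\n'
def get_rectangle (w : Int) (h_ : Int) : String :=
  String.ofList ((PySem.List.pyRange 0 h_ 1).foldl (fun rec i =>
    if i = 0 ∨ i = h_ - 1 then
      rec ++ (PySem.List.pyRepeat ['*'] w ++ ['\n'])
    else
      rec ++ (['*'] ++ PySem.List.pyRepeat [' '] (w - 2) ++ ['*'] ++ ['\n'])) [])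

-- ===== PORT B =====
-- cols = max(w,0); nested loops over (r,c), appending '*' when (r,c) lies on the border of the grid, ' ' otherwise
def get_rectangle_alt (w : Int) (h_ : Int) : String :=
  let cols := max w 0
  String.ofList ((PySem.List.pyRange 0 h_ 1).foldl (fun out r =>
    ((PySem.List.pyRange 0 cols 1).foldl (fun out2 c =>
      out2 ++ [if r = 0 ∨ r = h_ - 1 ∨ c = 0 ∨ c = cols - 1 then '*' else ' ']) out) ++ ['\n']) [])

-- ===== PRECONDITION & SPEC =====
-- For w <= 1 with h >= 3, A's middle rows are '**' (clamped negative repeat in '*'+(w-2)*' '+'*')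
-- although the box is at most 1 wide; B returns the intended width-max(w,0) rows.
def D_get_rectangle (w : Int) (h_ : Int) : Prop := w ≤ 1 ∧ 3 ≤ h_
instance (w : Int) (h_ : Int) : Decidable (D_get_rectangle w h_) := by unfold D_get_rectangle; infer_instance
def Spec_get_rectangle (w : Int) (h_ : Int) (out : String) : Prop := ¬ D_get_rectangle w h_ → out = get_rectangle_alt w h_
instance (w : Int) (h_ : Int) (out : String) : Decidable (Spec_get_rectangle w h_ out) := by unfold Spec_get_rectangle; infer_instance
def pvDiffWitness_get_rectangle : Int × Int := (1, 3)
def pvDiffWitnessOut_get_rectangle : String × String := ("*\n**\n*\n", "*\n*\n*\n")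

-- ===== CLAIM =====
def Claim_unchanged_get_rectangle : Prop := ∀ (w : Int) (h_ : Int), Dom_get_rectangle w h_ → Spec_get_rectangle w h_ (get_rectangle w h_)
def Claim_changed_get_rectangle : Prop := Dom_get_rectangle (pvDiffWitness_get_rectangle.1) (pvDiffWitness_get_rectangle.2) ∧ D_get_rectangle (pvDiffWitness_get_rectangle.1) (pvDiffWitness_get_rectangle.2) ∧ get_rectangle (pvDiffWitness_get_rectangle.1) (pvDiffWitness_get_rectangle.2) = pvDiffWitnessOut_get_rectangle.1 ∧ get_rectangle_alt (pvDiffWitness_get_rectangle.1) (pvDiffWitness_get_rectangle.2) = pvDiffWitnessOut_get_rectangle.2 ∧ pvDiffWitnessOut_get_rectangle.1 ≠ pvDiffWitnessOut_get_rectangle.2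

-- ===== LEMMAS AND PROOFS =====

-- B's row r, as a char list
def pvRowB (w h_ : Int) (r : Int) : List Char :=
  (PySem.List.pyRange 0 (max w 0) 1).map
    (fun c => if r = 0 ∨ r = h_ - 1 ∨ c = 0 ∨ c = max w 0 - 1 then '*' else ' ') ++ ['\n']

lemma b_inner_fold (w h_ : Int) (out : List Char) (r : Int) :
    ((PySem.List.pyRange 0 (max w 0) 1).foldl (fun out2 c =>
      out2 ++ [if r = 0 ∨ r = h_ - 1 ∨ c = 0 ∨ c = max w 0 - 1 then '*' else ' ']) out) ++ ['\n']
      = out ++ pvRowB w h_ r := by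
  rw [PySem.List.foldl_append_singleton_eq_map, pvRowB, List.append_assoc]

lemma rowB_border (w h_ : Int) (r : Int) (hr : r = 0 ∨ r = h_ - 1) :
    pvRowB w h_ r = List.replicate w.toNat '*' ++ ['\n'] := by
  unfold pvRowB
  congr 1
  have hall : ∀ c ∈ PySem.List.pyRange 0 (max w 0) 1,
      (if r = 0 ∨ r = h_ - 1 ∨ c = 0 ∨ c = max w 0 - 1 then '*' else ' ') = '*' := by
    intro c _
    rcases hr with h | h
    · rw [if_pos (Or.inl h)]
    · rw [if_pos (Or.inr (Or.inl h))]
  rw [List.map_congr_left hall, List.map_const']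
  congr 1
  rw [PySem.List.length_pyRange_one]
  omega

lemma rowB_mid (w h_ : Int) (hw : 2 ≤ w) (r : Int) (hr0 : r ≠ 0) (hr1 : r ≠ h_ - 1) :
    pvRowB w h_ r = ['*'] ++ List.replicate (w - 2).toNat ' ' ++ ['*'] ++ ['\n'] := by
  unfold pvRowB
  have hmax : max w 0 = w := by omega
  rw [hmax]
  congr 1
  rw [PySem.List.pyRange_one, List.map_map]
  apply List.ext_getElem
  · simp; omega
  · intro k hk hk'
    have hklen : k < (w - 0).toNat := by simpa using hk
    rw [List.getElem_map, List.getElem_range]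
    simp only [Function.comp, zero_add]
    by_cases hk0 : k = 0
    · subst hk0
      simp [hr0, hr1]
    · have hc0 : (k : Int) ≠ 0 := by exact_mod_cast hk0
      by_cases hkl : (k : Int) = w - 1
      · rw [if_pos (Or.inr (Or.inr (Or.inr hkl)))]
        rw [List.getElem_append_right (by simp; omega)]
        simp
      · rw [if_neg (by tauto)]
        rw [List.getElem_append_left (by simp; omega),
            List.getElem_append_right (by simp; omega)]
        simp

-- ===== VERDICT =====
theorem get_rectangle_spec : Claim_unchanged_get_rectangle := by
  unfold Claim_unchanged_get_rectangle
  intro w h_ _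
  unfold Spec_get_rectangle
  intro hnD
  unfold get_rectangle get_rectangle_alt
  congr 1
  apply Eq.symm
  apply PySem.List.foldl_congr_mem
  intro acc i hi
  rw [b_inner_fold w h_ acc i]
  have hmem : (0 : Int) ≤ i ∧ i < h_ := by
    simpa using (PySem.List.mem_pyRange_one.mp hi)
  by_cases hb : i = 0 ∨ i = h_ - 1
  · rw [rowB_border w h_ i hb, if_pos hb, PySem.List.pyRepeat_singleton]
  · push Not at hb
    have hw : 2 ≤ w := by
      unfold D_get_rectangle at hnD
      push Not at hnD
      have h3 : 3 ≤ h_ := by omega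
      omega
    rw [rowB_mid w h_ hw i hb.1 hb.2, if_neg (by tauto), PySem.List.pyRepeat_singleton]

theorem get_rectangle_changed : Claim_changed_get_rectangle := by
  unfold Claim_changed_get_rectangle; decide
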